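-- pv_equiv track=rewrite | github.com/NingWang0123/cs6120 | assa6/test_ssa.py | is_ssa
-- ===== SOURCE A (Python) =====
-- def is_ssa(bril):
--     """Check whether a Bril program is in SSA form."""
--     for func in bril["functions"]:
--         assigned = set()
--         for instr in func["instrs"]:
--             if "dest" in instr:
--                 if instr["dest"] in assigned:
--                     return False
--                 else:
--                     assigned.add(instr["dest"])
--     return True
-- ===== SOURCE B (Python) =====
-- def is_ssa(bril):
--     """Check whether a Bril program is in SSA form."""
--     for func in bril["functions"]:
--         dests = sorted(instr["dest"] for instr in func["instrs"] if "dest" in instr)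
--         for a, b in zip(dests, dests[1:]):
--             if a == b:
--                 return False
--     return True
-- ===== Notes on version B (the rewrite author's own statement) =====
-- stated objective: alternative
-- what changed: B detects a repeated dest per function by sorting the function's dest list and scanning adjacent pairs for an equal neighbour, instead of A's incremental hash-set membership test with early exit; no set is used at all.
import Mathlib
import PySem

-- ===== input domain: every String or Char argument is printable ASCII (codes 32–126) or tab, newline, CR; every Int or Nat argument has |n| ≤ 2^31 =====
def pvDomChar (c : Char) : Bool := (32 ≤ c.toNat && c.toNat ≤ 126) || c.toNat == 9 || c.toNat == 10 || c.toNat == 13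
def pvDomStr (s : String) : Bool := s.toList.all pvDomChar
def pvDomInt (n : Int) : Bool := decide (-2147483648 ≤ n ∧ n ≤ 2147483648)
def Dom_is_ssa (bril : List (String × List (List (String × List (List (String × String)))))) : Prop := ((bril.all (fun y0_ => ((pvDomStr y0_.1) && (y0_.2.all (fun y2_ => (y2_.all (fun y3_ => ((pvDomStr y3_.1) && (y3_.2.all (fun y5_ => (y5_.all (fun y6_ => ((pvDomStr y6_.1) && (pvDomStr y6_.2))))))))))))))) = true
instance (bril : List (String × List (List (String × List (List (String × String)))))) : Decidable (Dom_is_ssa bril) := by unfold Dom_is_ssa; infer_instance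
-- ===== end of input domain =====

-- B finds a repeated dest per function by sorting the dest list and scanning adjacent pairs,
-- instead of A's incremental set-membership test (objective: alternative; no set at all in B).

-- ===== PORT A =====
-- inner loop of A: 'for instr in func["instrs"]', threading the 'assigned' set; none = 'return False'
def issaInstrs (instrs : List (List (String × String))) (assigned : PySem.Set String) :
    Option (PySem.Set String) :=
  match instrs with
  | [] => some assigned
  | instr :: rest =>
    match (PySem.Dict.mk instr).get? "dest" with          -- '"dest" in instr' / 'instr["dest"]'
    | none => issaInstrs rest assigned
    | some dest =>
      if dest ∈ assigned then none                        -- 'return False'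
      else issaInstrs rest (PySem.Set.add assigned dest)  -- 'assigned.add(...)'

-- outer loop of A: 'for func in bril["functions"]'
def issaFuncs (funcs : List (List (String × List (List (String × String))))) : Bool :=
  match funcs with
  | [] => true
  | func :: rest =>
    match issaInstrs ((PySem.Dict.mk func).getD "instrs" []) PySem.Set.empty with
    | none => false
    | some _ => issaFuncs rest

def is_ssa (bril : List (String × List (List (String × List (List (String × String)))))) : Bool :=
  issaFuncs ((PySem.Dict.mk bril).getD "functions" [])    -- bril["functions"] (present under Pre_)

-- ===== PORT B =====
-- 'instr["dest"] for instr in func["instrs"] if "dest" in instr'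
def destsOf (instrs : List (List (String × String))) : List String :=
  instrs.filterMap (fun instr => (PySem.Dict.mk instr).get? "dest")

-- inner loop of B: 'for a, b in zip(dests, dests[1:]): if a == b: return False'; true = 'return False'
def adjScan (pairs : List (String × String)) : Bool :=
  match pairs with
  | [] => false
  | (a, b) :: rest => if a == b then true else adjScan rest

-- outer loop of B: 'for func in bril["functions"]'
def altFuncs (funcs : List (List (String × List (List (String × String))))) : Bool :=
  match funcs with
  | [] => true
  | func :: rest =>
    let dests := PySem.List.sorted (destsOf ((PySem.Dict.mk func).getD "instrs" []))
                   (fun x => x) false                     -- sorted(...)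
    if adjScan (dests.zip (PySem.List.slice dests (some 1) none))  -- zip(dests, dests[1:])
    then false else altFuncs rest

def is_ssa_alt (bril : List (String × List (List (String × List (List (String × String)))))) : Bool :=
  altFuncs ((PySem.Dict.mk bril).getD "functions" [])

-- ===== PRECONDITION & SPEC =====
-- Pre_ excludes exactly the inputs on which A raises KeyError: the program dict lacks the "functions"
-- key, or some function that the scan reaches (every earlier function has "instrs" and duplicate-free
-- dests, so no early 'return False' intervenes) lacks the "instrs" key.
def Pre_is_ssa (bril : List (String × List (List (String × List (List (String × String)))))) : Prop :=
  (PySem.Dict.mk bril).contains "functions" = true ∧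
  ∀ i, (h : i < ((PySem.Dict.mk bril).getD "functions" []).length) →
    (∀ j, (hj : j < ((PySem.Dict.mk bril).getD "functions" []).length) → j < i →
        (PySem.Dict.mk (((PySem.Dict.mk bril).getD "functions" [])[j])).contains "instrs" = true ∧
        (destsOf ((PySem.Dict.mk (((PySem.Dict.mk bril).getD "functions" [])[j])).getD "instrs" [])).Nodup) →
    (PySem.Dict.mk (((PySem.Dict.mk bril).getD "functions" [])[i])).contains "instrs" = true
instance (bril : List (String × List (List (String × List (List (String × String)))))) : Decidable (Pre_is_ssa bril) := by unfold Pre_is_ssa; infer_instance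

def pvWitness_is_ssa : (List (String × List (List (String × List (List (String × String)))))) :=
  [("functions", [[("instrs", [[("dest", "x")], [("op", "jmp")]])]])]

def Spec_is_ssa (bril : List (String × List (List (String × List (List (String × String)))))) (out : Bool) : Prop := out = is_ssa_alt bril
instance (bril : List (String × List (List (String × List (List (String × String)))))) (out : Bool) : Decidable (Spec_is_ssa bril out) := by unfold Spec_is_ssa; infer_instance

-- ===== CLAIM =====
def Claim_equal_is_ssa : Prop := ∀ (bril : List (String × List (List (String × List (List (String × String)))))), Dom_is_ssa bril → Pre_is_ssa bril → Spec_is_ssa bril (is_ssa bril)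

-- ===== LEMMAS AND PROOFS =====

-- A's inner loop returns False exactly when the dest list (prefixed with what is already assigned)
-- has a repetition.
theorem issaInstrs_eq_none (instrs : List (List (String × String)))
    (assigned : PySem.Set String) (h : assigned.Nodup) :
    issaInstrs instrs assigned = none ↔ ¬ (assigned ++ destsOf instrs).Nodup := by
  induction instrs generalizing assigned with
  | nil => simp [issaInstrs, destsOf, h]
  | cons instr rest ih =>
    rw [issaInstrs]
    cases hd : (PySem.Dict.mk instr).get? "dest" with
    | none => simpa [destsOf, hd] using ih assigned h
    | some dest =>
      by_cases hm : dest ∈ assigned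
      · simp only [hm, if_pos]
        constructor
        · intro _ hn
          rw [List.nodup_append] at hn
          exact hn.2.2 dest hm dest (by simp [destsOf, hd]) rfl
        · intro _; simp
      · simp only [hm, if_neg, not_false_iff]
        rw [PySem.Set.add_of_not_mem hm]
        have h' : (assigned ++ [dest]).Nodup := by
          rw [List.nodup_append]
          refine ⟨h, by simp, ?_⟩
          intro a ha b hb
          simp only [List.mem_singleton] at hb
          subst hb; exact fun hab => hm (hab ▸ ha)
        rw [ih (assigned ++ [dest]) h']
        simp [destsOf, hd, List.append_assoc]

-- B's adjacent scan of a (≤)-sorted list finds an equal neighbour iff the list has a repetition.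
theorem adjScan_sorted (xs : List String) (hs : xs.Pairwise (· ≤ ·)) :
    adjScan (xs.zip xs.tail) = true ↔ ¬ xs.Nodup := by
  induction xs with
  | nil => simp [adjScan]
  | cons a t ih =>
    cases t with
    | nil => simp [adjScan]
    | cons b u =>
      have hs' : (b :: u).Pairwise (· ≤ ·) := hs.tail
      rw [List.pairwise_cons] at hs
      simp only [List.tail_cons, List.zip_cons_cons, adjScan]
      by_cases hab : a = b
      · subst hab
        simp only [beq_self_eq_true, if_pos]
        constructor
        · intro _ hn
          rw [List.nodup_cons] at hn
          exact hn.1 (List.mem_cons_self)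
        · intro; trivial
      · have : (a == b) = false := beq_eq_false_iff_ne.mpr hab
        rw [this, if_neg (by simp)]
        simp only [List.tail_cons] at ih
        rw [ih hs']
        have hnotmem : a ∉ b :: u := by
          intro hmem
          rcases List.mem_cons.mp hmem with h1 | h2
          · exact hab h1
          · -- a ≤ b and b ≤ a (since a ∈ u, b ≤ a from hs'), so a = b
            have hba : b ≤ a := (List.pairwise_cons.mp hs').1 a h2
            have hab' : a ≤ b := hs.1 b (List.mem_cons_self)
            exact hab (le_antisymm hab' hba)
        constructor
        · intro hn hnd
          exact hn (List.nodup_cons.mp hnd).2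
        · intro hn hnd
          exact hn (List.nodup_cons.mpr ⟨hnotmem, hnd⟩)

-- A's outer loop equals B's outer loop.
theorem issaFuncs_eq_altFuncs (funcs : List (List (String × List (List (String × String))))) :
    issaFuncs funcs = altFuncs funcs := by
  induction funcs with
  | nil => rfl
  | cons func rest ih =>
    rw [issaFuncs, altFuncs]
    set ds := destsOf ((PySem.Dict.mk func).getD "instrs" []) with hds
    have hperm : (PySem.List.sorted ds (fun x => x) false).Perm ds := PySem.List.sorted_perm ds (fun x => x) false
    have hpw : (PySem.List.sorted ds (fun x => x) false).Pairwise (· ≤ ·) :=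
      PySem.List.sorted_pairwise ds (fun x => x)
    have hslice : PySem.List.slice (PySem.List.sorted ds (fun x => x) false) (some 1) none
        = (PySem.List.sorted ds (fun x => x) false).tail := PySem.List.slice_from_one _
    have hadj := adjScan_sorted (PySem.List.sorted ds (fun x => x) false) hpw
    have hnone := issaInstrs_eq_none ((PySem.Dict.mk func).getD "instrs" []) PySem.Set.empty
      (by simp [PySem.Set.empty])
    simp only [PySem.Set.empty, List.nil_append, ← hds] at hnone
    rw [hslice]
    cases hcase : issaInstrs ((PySem.Dict.mk func).getD "instrs" []) PySem.Set.empty with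
    | none =>
      have hnd : ¬ ds.Nodup := hnone.1 hcase
      have : ¬ (PySem.List.sorted ds (fun x => x) false).Nodup := fun h => hnd (hperm.nodup_iff.mp h)
      rw [hadj.mpr this]
      simp
    | some s =>
      have hnd : ds.Nodup := by
        by_contra hcon
        simp only [PySem.Set.empty] at hcase
        rw [hnone.2 hcon] at hcase
        simp at hcase
      have hnd' : (PySem.List.sorted ds (fun x => x) false).Nodup := hperm.nodup_iff.mpr hnd
      have : adjScan ((PySem.List.sorted ds (fun x => x) false).zip
          (PySem.List.sorted ds (fun x => x) false).tail) = false := by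
        cases h : adjScan ((PySem.List.sorted ds (fun x => x) false).zip
            (PySem.List.sorted ds (fun x => x) false).tail) with
        | false => rfl
        | true => exact absurd hnd' (hadj.mp h)
      rw [this]
      simp [ih]

-- ===== VERDICT =====
theorem is_ssa_spec : Claim_equal_is_ssa := by
  intro bril _ _
  unfold Spec_is_ssa is_ssa is_ssa_alt
  rw [issaFuncs_eq_altFuncs]
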